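-- pv_equiv track=rewrite | github.com/flucs-code/flucs | src/flucs/utilities/smooth_numbers.py | next_smooth_number
-- ===== SOURCE A (Python) =====
-- import heapq
--
-- def next_smooth_number(n: int, primes: list | None = None) -> int:
--     """Returns the smallest number that is strictly bigger than a given number n
--     and divisible only by the prime numbers specified in primes.
--
--     Parameters
--     ----------
--     n
--         The number to find the next smooth number for.
--     primes
--         List of primes. Defaults to ``[2, 3]``.  The algorithm assumes but does
--         not check that these numbers are prime.
--
--     Returns
--     -------
--         The smallest 3-smooth number bigger than ``n``.
--
--     """
--
--     if primes is None:
--         primes = [2, 3]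
--
--     # Use a heap to keep track of the smallest smooth number
--     # we have seen so far, and generate them in ascending order.
--     heap = [1]
--
--     while True:
--         guess = heapq.heappop(heap)
--
--         if n < guess:
--             return guess
--
--         for p in primes:
--             # It might be a good idea to check whether p * guess
--             # is way too large to even consider. Might speed things
--             # a bit but not really worth it given that it's unlikely
--             # we will ever use this for n > 10^4 or so.
--             heapq.heappush(heap, p * guess)
-- ===== SOURCE B (Python) =====
-- def next_smooth_number(n: int, primes: list | None = None) -> int:
--     """Smallest number > n whose only factors come from primes (default [2, 3]).
--
--     Recursive formulation: 1 is the smallest smooth number, and for n >= 1 the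
--     answer is the cheapest way to extend a smooth number by one prime factor:
--     min over p of p * next_smooth_number(n // p).
--     """
--     if primes is None:
--         primes = [2, 3]
--     if n < 1:
--         return 1
--     return min(p * next_smooth_number(n // p, primes) for p in primes)
-- ===== Notes on version B (the rewrite author's own statement) =====
-- stated objective: simpler
-- what changed: Replaces the heap-based ascending generator (duplicate pushes, pop-until-exceeds loop) with a three-line recursion: for n >= 1 the answer is min over p of p * next_smooth_number(n // p, primes).
-- outside the precondition, e.g. on next_smooth_number(4, [-2]): A returns 16, B returns -2
import Mathlib
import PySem

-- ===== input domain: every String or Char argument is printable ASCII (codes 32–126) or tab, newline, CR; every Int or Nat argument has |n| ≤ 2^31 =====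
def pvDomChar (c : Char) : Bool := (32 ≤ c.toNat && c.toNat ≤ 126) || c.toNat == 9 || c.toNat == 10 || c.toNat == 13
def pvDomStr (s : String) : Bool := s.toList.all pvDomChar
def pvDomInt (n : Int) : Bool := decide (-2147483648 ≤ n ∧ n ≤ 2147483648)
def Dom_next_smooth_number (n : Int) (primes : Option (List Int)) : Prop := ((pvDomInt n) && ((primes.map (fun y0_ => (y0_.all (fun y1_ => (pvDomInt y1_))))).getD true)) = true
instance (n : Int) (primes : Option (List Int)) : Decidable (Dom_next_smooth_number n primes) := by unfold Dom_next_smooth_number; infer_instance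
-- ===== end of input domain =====

-- B replaces A's heap-based ascending generator by a short recursion
-- (for n >= 1 the answer is min over p of p * next_smooth_number(n // p)); objective: simpler.


-- ===== PORT A =====
-- Fuel bound for A's heap loop: an upper bound on the number of heappops a value g
-- in the heap can still cause (1 for its own pop, plus its pushed children's).
def pvWeight (n : Int) (primes : List Int) (g : Int) : Nat :=
  if h : 1 ≤ g ∧ g ≤ n ∧ ∀ p ∈ primes, 2 ≤ p then
    1 + (primes.attach.map (fun p => pvWeight n primes (p.1 * g))).sum
  else 1
termination_by (n + 1 - g).toNat
decreasing_by
  obtain ⟨h1, h2, h3⟩ := h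
  have hp2 := h3 p.1 p.2
  have : g + 1 ≤ p.1 * g := by nlinarith
  omega

-- the `while True` loop. The heapq heap is ported as a multiset: an ordered map
-- value -> multiplicity (Std.TreeMap). heappop = least key, decrement its multiplicity
-- (erase at 1); heappush of each child p*guess = increment its multiplicity.
def aPush (t : Std.TreeMap Int Nat) (v : Int) : Std.TreeMap Int Nat :=
  t.insert v (t.getD v 0 + 1)

def aLoop (n : Int) (primes : List Int) : Nat → Std.TreeMap Int Nat → Int
  | 0, t => (t.minKey?).getD 0   -- fuel guard only; fuel = pvWeight is enough under Pre_
  | fuel + 1, t =>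
    match t.minKey? with
    | none => 0                  -- empty heap: Python raises IndexError here (outside Pre_)
    | some g =>
      let c := t.getD g 0
      let t' := if c ≤ 1 then t.erase g else t.insert g (c - 1)
      if n < g then g
      else aLoop n primes fuel (primes.foldl (fun a p => aPush a (p * g)) t')

def next_smooth_number (n : Int) (primes : Option (List Int)) : Int :=
  let ps := primes.getD [2, 3]
  aLoop n ps (pvWeight n ps 1) ((∅ : Std.TreeMap Int Nat).insert 1 1)

-- ===== PORT B =====
-- B's recursion: 1 if n < 1, else min over p of p * next_smooth_number(n // p).
-- For p ≤ 1 the Lean recursive argument is -1 instead of n // p: in Python, for p ≤ -1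
-- the argument n // p is also < 1 (so the call returns 1 either way), and for p ∈ {0, 1}
-- Python raises/diverges (outside Pre_); -1 is the total stand-in that keeps termination.
def altRec (primes : List Int) (n : Int) : Int :=
  if n < 1 then 1
  else
    ((primes.attach.map (fun p =>
        p.1 * altRec primes (if 2 ≤ p.1 then PySem.Int.floordiv n p.1 else -1))).min?).getD 0
        -- .getD 0: min? is none only for primes = [], where Python's min raises (outside Pre_)
termination_by n.toNat
decreasing_by
  split
  · rename_i hn h2
    have hlt : PySem.Int.floordiv n p.1 < n := by
      rw [PySem.Int.floordiv_lt_iff_lt_mul (by omega)]; nlinarith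
    have _hnn : 0 ≤ PySem.Int.floordiv n p.1 := by
      have := (PySem.Int.le_floordiv_iff_mul_le (b := p.1) (a := n) (q := 0) (by omega)).mpr (by omega)
      omega
    omega
  · omega

def next_smooth_number_alt (n : Int) (primes : Option (List Int)) : Int :=
  let ps := primes.getD [2, 3]
  altRec ps n

-- ===== PRECONDITION & SPEC =====
-- Pre_ excludes prime lists containing an entry < 2 when n ≥ 1: there A raises IndexError
-- (empty list) or diverges (an entry 0 or 1, or mixed signs), and for all-negative lists A
-- happens to return a sign-cancellation artefact (e.g. 16 for (4, [-2])) no caller would specify.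
def Pre_next_smooth_number (n : Int) (primes : Option (List Int)) : Prop :=
  n < 1 ∨ ((primes.getD [2, 3]) ≠ [] ∧ ∀ p ∈ primes.getD [2, 3], 2 ≤ p)
instance (n : Int) (primes : Option (List Int)) : Decidable (Pre_next_smooth_number n primes) := by
  unfold Pre_next_smooth_number; infer_instance

def pvWitness_next_smooth_number : Int × Option (List Int) := (10, none)

def Spec_next_smooth_number (n : Int) (primes : Option (List Int)) (out : Int) : Prop := out = next_smooth_number_alt n primes
instance (n : Int) (primes : Option (List Int)) (out : Int) : Decidable (Spec_next_smooth_number n primes out) := by unfold Spec_next_smooth_number; infer_instance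

-- ===== CLAIM (what is proved, stated in full; the proofs are below) =====
def Claim_equal_next_smooth_number : Prop := ∀ (n : Int) (primes : Option (List Int)), Dom_next_smooth_number n primes → Pre_next_smooth_number n primes → Spec_next_smooth_number n primes (next_smooth_number n primes)

-- ===== LEMMAS AND PROOFS =====

-- the multiplicative closure of the prime list, the set both programs enumerate
inductive PvSmooth (ps : List Int) : Int → Prop
  | one : PvSmooth ps 1
  | mul {p s : Int} : p ∈ ps → PvSmooth ps s → PvSmooth ps (p * s)

-- "r is the smallest element of the closure strictly greater than n"
def PvIsNext (n : Int) (ps : List Int) (r : Int) : Prop :=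
  PvSmooth ps r ∧ n < r ∧ ∀ s, PvSmooth ps s → n < s → r ≤ s

lemma pvSmooth_one_le {ps : List Int} (hp : ∀ p ∈ ps, 2 ≤ p) {s : Int}
    (hs : PvSmooth ps s) : 1 ≤ s := by
  induction hs with
  | one => exact le_refl 1
  | mul hpm _ ih => rename_i p t _; have := hp p hpm; nlinarith

lemma pvSmooth_cases {ps : List Int} {s : Int} (hs : PvSmooth ps s) :
    s = 1 ∨ ∃ p t, p ∈ ps ∧ PvSmooth ps t ∧ s = p * t := by
  cases hs with
  | one => exact Or.inl rfl
  | mul hpm ht => rename_i p t; exact Or.inr ⟨p, t, hpm, ht, rfl⟩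

lemma pvExists_smooth_gt {ps : List Int} (hne : ps ≠ []) (hp : ∀ p ∈ ps, 2 ≤ p)
    (n : Int) : ∃ s, PvSmooth ps s ∧ n < s := by
  obtain ⟨p, ps', rfl⟩ := List.exists_cons_of_ne_nil hne
  have hpm : p ∈ p :: ps' := List.mem_cons_self
  have hp2 : 2 ≤ p := hp p hpm
  have hpow : ∀ k : Nat, PvSmooth (p :: ps') (p ^ k) ∧ (2 : Int) ^ k ≤ p ^ k := by
    intro k
    induction k with
    | zero => exact ⟨by simpa using PvSmooth.one, by norm_num⟩
    | succ m ih =>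
      refine ⟨?_, ?_⟩
      · have := PvSmooth.mul hpm ih.1
        simpa [pow_succ, mul_comm] using this
      · have h1 : (0 : Int) < 2 ^ m := by positivity
        calc (2 : Int) ^ (m + 1) = 2 ^ m * 2 := by ring
          _ ≤ p ^ m * p := by nlinarith [ih.2]
          _ = p ^ (m + 1) := by ring
  refine ⟨p ^ (n.toNat + 1), (hpow _).1, ?_⟩
  have h2 : (n.toNat : Int) < 2 ^ (n.toNat + 1) := by
    have := Nat.lt_two_pow_self (n := n.toNat)
    have h3 : (n.toNat : Int) < ((2 : Nat) ^ n.toNat : Nat) := by exact_mod_cast this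
    have h4 : ((2 : Nat) ^ n.toNat : Int) = (2 : Int) ^ n.toNat := by push_cast; ring
    have h5 : (2 : Int) ^ n.toNat ≤ 2 ^ (n.toNat + 1) := by
      have : (0:Int) < 2 ^ n.toNat := by positivity
      calc (2:Int) ^ n.toNat ≤ 2 ^ n.toNat * 2 := by nlinarith
        _ = 2 ^ (n.toNat + 1) := by ring
    omega
  have := (hpow (n.toNat + 1)).2
  omega

lemma pvIsNext_unique {n : Int} {ps : List Int} {a b : Int}
    (ha : PvIsNext n ps a) (hb : PvIsNext n ps b) : a = b :=
  le_antisymm (ha.2.2 b hb.1 hb.2.1) (hb.2.2 a ha.1 ha.2.1)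

lemma pvSum_attach (l : List Int) (f : Int → Nat) :
    (l.attach.map (fun p => f p.1)).sum = (l.map f).sum := by
  induction l with
  | nil => rfl
  | cons a t ih => simp_all [List.attach_cons]

lemma pvWeight_pos (n : Int) (ps : List Int) (g : Int) : 1 ≤ pvWeight n ps g := by
  rw [pvWeight]; split <;> omega

-- B's recursion computes the smallest smooth number > n (strong induction on n.toNat).
lemma altRec_correct {ps : List Int} (hne : ps ≠ []) (hp : ∀ p ∈ ps, 2 ≤ p) :
    ∀ (k : Nat) (n : Int), n.toNat ≤ k → PvIsNext n ps (altRec ps n) := by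
  intro k
  induction k with
  | zero =>
    intro n hk
    have hn : n < 1 := by omega
    rw [altRec, if_pos hn]
    exact ⟨PvSmooth.one, hn, fun s hs _ => pvSmooth_one_le hp hs⟩
  | succ m ih =>
    intro n hk
    by_cases hn : n < 1
    · rw [altRec, if_pos hn]
      exact ⟨PvSmooth.one, hn, fun s hs _ => pvSmooth_one_le hp hs⟩
    · rw [altRec, if_neg hn]
      have hn1 : 1 ≤ n := by omega
      -- the candidate list is nonempty
      set f : {x // x ∈ ps} → Int :=
        fun p => p.1 * altRec ps (if 2 ≤ p.1 then PySem.Int.floordiv n p.1 else -1) with hf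
      have hLne : ps.attach.map f ≠ [] := by
        simp [List.map_eq_nil_iff, List.attach_eq_nil_iff, hne]
      obtain ⟨c, hc⟩ : ∃ c, (ps.attach.map f).min? = some c := by
        cases h : (ps.attach.map f).min? with
        | none => exact absurd (List.min?_eq_none_iff.mp h) hLne
        | some c => exact ⟨c, rfl⟩
      have hcspec := List.min?_eq_some_iff.mp hc
      rw [hc]
      simp only [Option.getD_some]
      -- the IH applies at every recursive argument n // p
      have harg : ∀ p ∈ ps, (PySem.Int.floordiv n p).toNat ≤ m ∧
          PySem.Int.floordiv n p < n := by
        intro p hpm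
        have hp2 := hp p hpm
        have hlt : PySem.Int.floordiv n p < n := by
          rw [PySem.Int.floordiv_lt_iff_lt_mul (by omega)]; nlinarith
        have hnn : 0 ≤ PySem.Int.floordiv n p := by
          have := (PySem.Int.le_floordiv_iff_mul_le (b := p) (a := n) (q := 0) (by omega)).mpr (by omega)
          omega
        exact ⟨by omega, hlt⟩
      -- every candidate is smooth and > n
      have hcand : ∀ x ∈ ps.attach.map f, PvSmooth ps x ∧ n < x := by
        intro x hx
        obtain ⟨⟨p, hpm⟩, _, rfl⟩ := List.mem_map.mp hx
        have hp2 := hp p hpm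
        simp only [hf, if_pos hp2]
        obtain ⟨hm, _⟩ := harg p hpm
        obtain ⟨hsm, hgt, _⟩ := ih (PySem.Int.floordiv n p) hm
        refine ⟨PvSmooth.mul hpm hsm, ?_⟩
        have := (PySem.Int.floordiv_lt_iff_lt_mul
          (a := n) (b := p) (q := altRec ps (PySem.Int.floordiv n p)) (by omega)).mp hgt
        linarith [this]
      obtain ⟨hcsm, hcgt⟩ := hcand c hcspec.1
      refine ⟨hcsm, hcgt, ?_⟩
      -- minimality: any smooth s > n dominates some candidate
      intro s hs hns
      rcases pvSmooth_cases hs with rfl | ⟨q, t, hqm, ht, rfl⟩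
      · omega
      · have hq2 := hp q hqm
        have ht1 : 1 ≤ t := pvSmooth_one_le hp ht
        have htgt : PySem.Int.floordiv n q < t := by
          rw [PySem.Int.floordiv_lt_iff_lt_mul (by omega)]; nlinarith
        obtain ⟨hm, _⟩ := harg q hqm
        obtain ⟨_, _, hmin⟩ := ih (PySem.Int.floordiv n q) hm
        have hrt : altRec ps (PySem.Int.floordiv n q) ≤ t := hmin t ht htgt
        have hcq : f ⟨q, hqm⟩ ∈ ps.attach.map f :=
          List.mem_map.mpr ⟨⟨q, hqm⟩, List.mem_attach _ _, rfl⟩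
        have hle := hcspec.2 _ hcq
        have : f ⟨q, hqm⟩ ≤ q * t := by
          simp only [hf, if_pos hq2]
          nlinarith
        linarith

-- the ghost multiset view of the TreeMap heap: counts agree, no key has multiplicity 0
def PvRep (t : Std.TreeMap Int Nat) (L : List Int) : Prop :=
  (∀ v : Int, t.getD v 0 = L.count v) ∧ (∀ v : Int, v ∈ t → t.getD v 0 ≠ 0)

lemma pvCmpEq {a b : Int} : compare a b = Ordering.eq ↔ a = b :=
  Std.LawfulEqCmp.compare_eq_iff_eq

lemma pvRep_mem {t : Std.TreeMap Int Nat} {L : List Int} (hr : PvRep t L) (v : Int) :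
    v ∈ t ↔ v ∈ L := by
  constructor
  · intro hv
    have := hr.2 v hv
    rw [hr.1 v] at this
    exact List.count_pos_iff.mp (by omega)
  · intro hv
    by_contra hc
    have hcc : t.contains v = false := by
      rw [← Bool.not_eq_true, ← Std.TreeMap.mem_iff_contains]; exact hc
    have h0 := Std.TreeMap.getD_eq_fallback_of_contains_eq_false (fallback := (0 : Nat)) hcc
    rw [hr.1 v] at h0
    have := List.count_pos_iff.mpr hv
    omega

lemma pvRep_min {t : Std.TreeMap Int Nat} {L : List Int} {g : Int} (hr : PvRep t L)
    (hmin : t.minKey? = some g) : g ∈ L ∧ ∀ v ∈ L, g ≤ v := by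
  obtain ⟨hm, hall⟩ := Std.TreeMap.minKey?_eq_some_iff_mem_and_forall.mp hmin
  refine ⟨(pvRep_mem hr g).mp hm, ?_⟩
  intro v hv
  have := hall v ((pvRep_mem hr v).mpr hv)
  exact Int.isLE_compare.mp this

lemma pvRep_none {t : Std.TreeMap Int Nat} {L : List Int} (hr : PvRep t L)
    (hmin : t.minKey? = none) : L = [] := by
  have hemp := Std.TreeMap.minKey?_eq_none_iff.mp hmin
  cases L with
  | nil => rfl
  | cons a L' =>
    exfalso
    have ha : a ∈ t := (pvRep_mem hr a).mpr List.mem_cons_self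
    have := Std.TreeMap.contains_of_isEmpty (a := a) hemp
    rw [Std.TreeMap.mem_iff_contains] at ha
    simp [this] at ha

lemma pvRep_count_congr {t : Std.TreeMap Int Nat} {L L' : List Int}
    (hc : ∀ v : Int, L.count v = L'.count v) (hr : PvRep t L) : PvRep t L' :=
  ⟨fun v => (hr.1 v).trans (hc v), hr.2⟩

lemma pvRep_push {t : Std.TreeMap Int Nat} {L : List Int} (hr : PvRep t L) (v : Int) :
    PvRep (aPush t v) (v :: L) := by
  constructor
  · intro w
    rw [aPush, Std.TreeMap.getD_insert]
    by_cases hw : v = w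
    · subst hw
      rw [if_pos (pvCmpEq.mpr rfl), hr.1 v, List.count_cons_self]
    · rw [if_neg (fun h => hw (pvCmpEq.mp h)), hr.1 w, List.count_cons]
      simp [hw]
  · intro w hw
    rw [aPush, Std.TreeMap.getD_insert]
    by_cases hvw : v = w
    · subst hvw
      rw [if_pos (pvCmpEq.mpr rfl)]
      omega
    · rw [if_neg (fun h => hvw (pvCmpEq.mp h))]
      rw [aPush, Std.TreeMap.mem_insert] at hw
      rcases hw with h | h
      · exact absurd (pvCmpEq.mp h) hvw
      · exact hr.2 w h

lemma pvRep_pop {t : Std.TreeMap Int Nat} {L : List Int} {g : Int} (hr : PvRep t L)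
    (hg : g ∈ L) :
    PvRep (if t.getD g 0 ≤ 1 then t.erase g else t.insert g (t.getD g 0 - 1)) (L.erase g) := by
  have hcnt := hr.1 g
  have hpos : 0 < L.count g := List.count_pos_iff.mpr hg
  by_cases hc : t.getD g 0 ≤ 1
  · rw [if_pos hc]
    constructor
    · intro w
      by_cases hw : g = w
      · subst hw
        rw [Std.TreeMap.getD_erase_self, List.count_erase_self]
        omega
      · rw [Std.TreeMap.getD_erase, if_neg (fun h => hw (pvCmpEq.mp h)), hr.1 w,
          List.count_erase_of_ne (Ne.symm hw)]
    · intro w hw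
      rw [Std.TreeMap.mem_erase] at hw
      rw [Std.TreeMap.getD_erase, if_neg hw.1]
      exact hr.2 w hw.2
  · rw [if_neg hc]
    constructor
    · intro w
      by_cases hw : g = w
      · subst hw
        rw [Std.TreeMap.getD_insert_self, List.count_erase_self]
        omega
      · rw [Std.TreeMap.getD_insert, if_neg (fun h => hw (pvCmpEq.mp h)), hr.1 w,
          List.count_erase_of_ne (Ne.symm hw)]
    · intro w hw
      by_cases hw' : g = w
      · subst hw'
        rw [Std.TreeMap.getD_insert_self]
        omega
      · rw [Std.TreeMap.getD_insert, if_neg (fun h => hw' (pvCmpEq.mp h))]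
        rw [Std.TreeMap.mem_insert] at hw
        rcases hw with h | h
        · exact absurd (pvCmpEq.mp h) hw'
        · exact hr.2 w h

lemma pvRep_fold (g : Int) :
    ∀ (ps : List Int) (t : Std.TreeMap Int Nat) (L : List Int), PvRep t L →
      PvRep (ps.foldl (fun a p => aPush a (p * g)) t) (ps.map (fun p => p * g) ++ L) := by
  intro ps
  induction ps with
  | nil => intro t L hr; simpa using hr
  | cons p ps' ih =>
    intro t L hr
    have hstep := ih (aPush t (p * g)) (p * g :: L) (pvRep_push hr (p * g))
    rw [List.foldl_cons]
    refine pvRep_count_congr (fun v => ?_) hstep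
    simp [List.count_append, List.count_cons]
    omega

-- A's heap loop computes the smallest smooth number > n, given the covering invariant
-- on the ghost multiset L represented by the TreeMap heap.
lemma aLoop_correct {ps : List Int} (n : Int) (hne : ps ≠ []) (hp : ∀ p ∈ ps, 2 ≤ p) :
    ∀ (fuel : Nat) (t : Std.TreeMap Int Nat) (L : List Int),
      PvRep t L →
      (∀ h ∈ L, PvSmooth ps h) →
      (∀ s, PvSmooth ps s → n < s → ∃ h ∈ L, ∃ u, PvSmooth ps u ∧ h * u = s) →
      (L.map (pvWeight n ps)).sum ≤ fuel →
      PvIsNext n ps (aLoop n ps fuel t) := by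
  intro fuel
  induction fuel with
  | zero =>
    intro t L hr hsm hcov hfuel
    exfalso
    obtain ⟨s, hs, hns⟩ := pvExists_smooth_gt hne hp n
    obtain ⟨h, hh, _⟩ := hcov s hs hns
    have hmem : pvWeight n ps h ∈ L.map (pvWeight n ps) := List.mem_map.mpr ⟨h, hh, rfl⟩
    have := List.le_sum_of_mem hmem
    have := pvWeight_pos n ps h
    omega
  | succ f ih =>
    intro t L hr hsm hcov hfuel
    cases hmin : t.minKey? with
    | none =>
      exfalso
      obtain ⟨s, hs, hns⟩ := pvExists_smooth_gt hne hp n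
      obtain ⟨h, hh, _⟩ := hcov s hs hns
      rw [pvRep_none hr hmin] at hh
      exact absurd hh (List.not_mem_nil)
    | some g =>
      have hstep : aLoop n ps (f + 1) t
          = if n < g then g
            else aLoop n ps f (ps.foldl (fun a p => aPush a (p * g))
              (if t.getD g 0 ≤ 1 then t.erase g else t.insert g (t.getD g 0 - 1))) := by
        rw [aLoop, hmin]
      rw [hstep]
      obtain ⟨hg, hgle⟩ := pvRep_min hr hmin
      have hgsm : PvSmooth ps g := hsm g hg
      have hg1 : 1 ≤ g := pvSmooth_one_le hp hgsm
      by_cases hng : n < g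
      · rw [if_pos hng]
        refine ⟨hgsm, hng, ?_⟩
        intro s hs hns
        obtain ⟨h, hh, u, hu, hprod⟩ := hcov s hs hns
        have hu1 : 1 ≤ u := pvSmooth_one_le hp hu
        have hh1 : 1 ≤ h := pvSmooth_one_le hp (hsm h hh)
        have hhs : h ≤ s := by nlinarith
        have := hgle h hh
        omega
      · rw [if_neg hng]
        have hr' : PvRep (ps.foldl (fun a p => aPush a (p * g))
            (if t.getD g 0 ≤ 1 then t.erase g else t.insert g (t.getD g 0 - 1)))
            (ps.map (fun p => p * g) ++ L.erase g) :=
          pvRep_fold g ps _ _ (pvRep_pop hr hg)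
        apply ih _ _ hr'
        · -- all ghost heap elements smooth
          intro h hh
          rcases List.mem_append.mp hh with hh' | hh'
          · obtain ⟨p, hpm, rfl⟩ := List.mem_map.mp hh'
            exact PvSmooth.mul hpm hgsm
          · exact hsm h (List.mem_of_mem_erase hh')
        · -- covering preserved
          intro s hs hns
          obtain ⟨h, hh, u, hu, hprod⟩ := hcov s hs hns
          by_cases hhg : h ∈ L.erase g
          · exact ⟨h, List.mem_append.mpr (Or.inr hhg), u, hu, hprod⟩
          · have hheq : h = g := by
              by_contra hc
              exact hhg ((List.mem_erase_of_ne hc).mpr hh)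
            subst hheq
            rcases pvSmooth_cases hu with rfl | ⟨p, u', hpm, hu', rfl⟩
            · exfalso; rw [mul_one] at hprod; omega
            · refine ⟨p * h, List.mem_append.mpr (Or.inl (List.mem_map.mpr ⟨p, hpm, rfl⟩)),
                u', hu', ?_⟩
              rw [← hprod]; ring
        · -- fuel decreases with the total weight of the ghost multiset
          have hperm : L.Perm (g :: L.erase g) := List.perm_cons_erase hg
          have hsum : (L.map (pvWeight n ps)).sum
              = pvWeight n ps g + ((L.erase g).map (pvWeight n ps)).sum := by
            have := (hperm.map (pvWeight n ps)).sum_eq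
            simpa using this
          have hwg : pvWeight n ps g
              = 1 + (ps.map (fun p => pvWeight n ps (p * g))).sum := by
            rw [pvWeight, dif_pos ⟨hg1, by omega, hp⟩]
            congr 1
            exact pvSum_attach ps (fun p => pvWeight n ps (p * g))
          have hmapmap : ((ps.map (fun p => p * g)).map (pvWeight n ps)).sum
              = (ps.map (fun p => pvWeight n ps (p * g))).sum := by
            rw [List.map_map]; rfl
          rw [List.map_append, List.sum_append, hmapmap]
          omega

-- ===== VERDICT (by name: the statement is the Claim_ definition above) =====
theorem next_smooth_number_spec : Claim_equal_next_smooth_number := by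
  intro n primes _ hpre
  unfold Spec_next_smooth_number next_smooth_number next_smooth_number_alt
  show aLoop n (primes.getD [2, 3]) (pvWeight n (primes.getD [2, 3]) 1)
        ((∅ : Std.TreeMap Int Nat).insert 1 1)
      = altRec (primes.getD [2, 3]) n
  have hr0 : PvRep ((∅ : Std.TreeMap Int Nat).insert 1 1) [1] := by
    constructor
    · intro v
      rw [Std.TreeMap.getD_insert]
      by_cases hv : (1 : Int) = v
      · subst hv
        rw [if_pos (pvCmpEq.mpr rfl)]
        rfl
      · rw [if_neg (fun h => hv (pvCmpEq.mp h)), Std.TreeMap.getD_emptyc, List.count_cons]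
        simp [hv]
    · intro v hv
      rw [Std.TreeMap.mem_insert] at hv
      rcases hv with h | h
      · have : (1 : Int) = v := pvCmpEq.mp h
        subst this
        rw [Std.TreeMap.getD_insert_self]
        omega
      · rw [Std.TreeMap.mem_iff_contains, Std.TreeMap.contains_emptyc] at h
        exact absurd h (by simp)
  by_cases hn : n < 1
  · -- both sides return 1: A pops 1 and returns it at once, B's base case
    obtain ⟨f, hf⟩ : ∃ f, pvWeight n (primes.getD [2, 3]) 1 = f + 1 := by
      have := pvWeight_pos n (primes.getD [2, 3]) 1
      exact ⟨pvWeight n (primes.getD [2, 3]) 1 - 1, by omega⟩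
    have hmin1 : ((∅ : Std.TreeMap Int Nat).insert 1 1).minKey? = some 1 := by
      rw [Std.TreeMap.minKey?_eq_some_iff_mem_and_forall]
      constructor
      · exact (pvRep_mem hr0 1).mpr List.mem_cons_self
      · intro k hk
        have : k ∈ ([1] : List Int) := (pvRep_mem hr0 k).mp hk
        simp at this
        subst this
        exact Int.isLE_compare.mpr le_rfl
    have hstep : aLoop n (primes.getD [2, 3]) (f + 1) ((∅ : Std.TreeMap Int Nat).insert 1 1)
        = if n < 1 then 1
          else aLoop n (primes.getD [2, 3]) f ((primes.getD [2, 3]).foldl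
            (fun a p => aPush a (p * 1))
            (if ((∅ : Std.TreeMap Int Nat).insert 1 1).getD 1 0 ≤ 1
              then ((∅ : Std.TreeMap Int Nat).insert 1 1).erase 1
              else ((∅ : Std.TreeMap Int Nat).insert 1 1).insert 1
                (((∅ : Std.TreeMap Int Nat).insert 1 1).getD 1 0 - 1))) := by
      rw [aLoop, hmin1]
    rw [hf, hstep, if_pos hn, altRec, if_pos hn]
  · rcases hpre with hlt | ⟨hne, hp⟩
    · omega
    · exact pvIsNext_unique
        (aLoop_correct n hne hp (pvWeight n (primes.getD [2, 3]) 1)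
          ((∅ : Std.TreeMap Int Nat).insert 1 1) [1] hr0
          (by intro h hh; simp at hh; subst hh; exact PvSmooth.one)
          (by intro s hs hns; exact ⟨1, by simp, s, hs, one_mul s⟩)
          (by simp))
        (altRec_correct hne hp n.toNat n (le_refl _))
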